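-- pv_equiv track=rewrite | github.com/yoosehyeon/DL_PROJECT | data_pipeline.py | _cwru_class_for
-- ===== SOURCE A (Python) =====
-- from typing import Dict, List, Optional, Tuple
--
-- def _cwru_class_for(file_num: int) -> Optional[int]:
--     """CWRU 파일 번호를 IR(0)/B(1)/OR(2) 3-class로 매핑.
--
--     매핑에 없는 파일은 None을 반환하여 호출자가 skip하도록 한다.
--     라벨이 명확한 파일만 사용하면 학습 신호가 깨끗해진다.
--     """
--     ir_ranges = [(105, 108), (169, 172), (209, 212), (278, 281)]
--     b_ranges  = [(118, 121), (185, 188), (222, 225), (282, 285), (286, 289)]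
--     or_ranges = [
--         (130, 133), (144, 147), (156, 159),
--         (197, 200), (234, 237), (246, 249), (258, 261),
--         (294, 297), (298, 301), (310, 313),
--     ]
--     def _in(num, rngs):
--         return any(a <= num <= b for a, b in rngs)
--     if _in(file_num, ir_ranges): return 0
--     if _in(file_num, b_ranges):  return 1
--     if _in(file_num, or_ranges): return 2
--     return None  # 매핑 없음 → 호출자가 skip
-- ===== SOURCE B (Python) =====
-- # B: precompute a number->class lookup table once (lower-priority classes inserted
-- # first so higher-priority ones would overwrite on overlap); the function is a dict get.
-- def _build_table():
--     ir_ranges = [(105, 108), (169, 172), (209, 212), (278, 281)]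
--     b_ranges  = [(118, 121), (185, 188), (222, 225), (282, 285), (286, 289)]
--     or_ranges = [
--         (130, 133), (144, 147), (156, 159),
--         (197, 200), (234, 237), (246, 249), (258, 261),
--         (294, 297), (298, 301), (310, 313),
--     ]
--     table = {}
--     for cls, ranges in ((2, or_ranges), (1, b_ranges), (0, ir_ranges)):
--         for a, b in ranges:
--             for n in range(a, b + 1):
--                 table[n] = cls
--     return table
--
-- _TABLE = _build_table()
--
-- def _cwru_class_for(file_num: int):
--     return _TABLE.get(file_num)
-- ===== Notes on version B (the rewrite author's own statement) =====
-- stated objective: idiomatic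
-- what changed: Replaced the three sequential any-over-ranges scans with a dict built once at module load by expanding every inclusive range (lower-priority classes inserted first), so the function body is a single table lookup.
import Mathlib
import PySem

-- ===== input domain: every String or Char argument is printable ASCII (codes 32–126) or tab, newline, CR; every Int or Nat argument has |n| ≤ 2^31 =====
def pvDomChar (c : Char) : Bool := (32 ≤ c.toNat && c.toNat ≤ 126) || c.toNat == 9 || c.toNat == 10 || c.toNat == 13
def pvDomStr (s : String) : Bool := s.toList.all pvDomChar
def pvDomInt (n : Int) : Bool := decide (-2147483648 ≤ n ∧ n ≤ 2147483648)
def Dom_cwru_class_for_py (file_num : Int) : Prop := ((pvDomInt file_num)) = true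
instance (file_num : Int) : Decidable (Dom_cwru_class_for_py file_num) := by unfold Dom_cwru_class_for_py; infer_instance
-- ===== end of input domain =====

-- B replaces A's three per-call range scans with a table precomputed once (idiomatic lookup-table form; same results).


-- ===== PORT A =====
def cwruIn (num : Int) (rngs : List (Int × Int)) : Bool :=
  rngs.any (fun ab => decide (ab.1 ≤ num) && decide (num ≤ ab.2))

def cwru_class_for_py (file_num : Int) : Option Int :=
  let ir_ranges : List (Int × Int) := [(105, 108), (169, 172), (209, 212), (278, 281)]
  let b_ranges  : List (Int × Int) := [(118, 121), (185, 188), (222, 225), (282, 285), (286, 289)]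
  let or_ranges : List (Int × Int) :=
    [(130, 133), (144, 147), (156, 159),
     (197, 200), (234, 237), (246, 249), (258, 261),
     (294, 297), (298, 301), (310, 313)]
  if cwruIn file_num ir_ranges then some 0
  else if cwruIn file_num b_ranges then some 1
  else if cwruIn file_num or_ranges then some 2
  else none

-- ===== PORT B =====
def cwruTable : PySem.Dict Int Int :=
  let ir_ranges : List (Int × Int) := [(105, 108), (169, 172), (209, 212), (278, 281)]
  let b_ranges  : List (Int × Int) := [(118, 121), (185, 188), (222, 225), (282, 285), (286, 289)]
  let or_ranges : List (Int × Int) :=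
    [(130, 133), (144, 147), (156, 159),
     (197, 200), (234, 237), (246, 249), (258, 261),
     (294, 297), (298, 301), (310, 313)]
  [((2 : Int), or_ranges), (1, b_ranges), (0, ir_ranges)].foldl
    (fun t ci =>
      ci.2.foldl
        (fun t ab =>
          (PySem.List.pyRange ab.1 (ab.2 + 1) 1).foldl (fun t n => t.insert n ci.1) t)
        t)
    PySem.Dict.empty

def cwru_class_for_py_alt (file_num : Int) : Option Int :=
  cwruTable.get? file_num

-- ===== PRECONDITION & SPEC =====
def Spec_cwru_class_for_py (file_num : Int) (out : Option Int) : Prop := out = cwru_class_for_py_alt file_num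
instance (file_num : Int) (out : Option Int) : Decidable (Spec_cwru_class_for_py file_num out) := by unfold Spec_cwru_class_for_py; infer_instance

-- ===== CLAIM (what is proved, stated in full; the proofs are below) =====
def Claim_equal_cwru_class_for_py : Prop := ∀ (file_num : Int), Dom_cwru_class_for_py file_num → Spec_cwru_class_for_py file_num (cwru_class_for_py file_num)

-- ===== LEMMAS AND PROOFS =====

-- ===== VERDICT (by name: the statement is the Claim_ definition above) =====
set_option maxRecDepth 4000 in
lemma cwru_keys_bounded : ∀ k ∈ cwruTable.keys, 105 ≤ k ∧ k ≤ 313 := by decide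

set_option maxRecDepth 10000 in
lemma cwru_in_range : ∀ k ∈ Finset.range 209,
    cwru_class_for_py (105 + k) = cwru_class_for_py_alt (105 + k) := by decide

theorem cwru_class_for_py_spec : Claim_equal_cwru_class_for_py := by
  intro n _
  unfold Spec_cwru_class_for_py
  by_cases h : 105 ≤ n ∧ n ≤ 313
  · have hk : n = 105 + ((n - 105).toNat : Int) := by omega
    have hm : (n - 105).toNat ∈ Finset.range 209 := by
      simp only [Finset.mem_range]; omega
    have := cwru_in_range _ hm
    rwa [hk]
  · have hb : cwru_class_for_py_alt n = none := by
      unfold cwru_class_for_py_alt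
      rw [PySem.Dict.get?_eq_none_iff_not_mem_keys]
      intro hmem
      have := cwru_keys_bounded n hmem
      omega
    have ha : cwru_class_for_py n = none := by
      simp only [cwru_class_for_py, cwruIn, List.any_cons, List.any_nil]
      split_ifs with h1 h2 h3 <;> simp_all <;> omega
    rw [ha, hb]
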